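-- pv_equiv track=rewrite | github.com/netra-systems/zen | tests/e2e/golden_path/test_complete_golden_path_user_journey_comprehensive.py | _analyze_scenario_business_value
-- ===== SOURCE A (Python) =====
-- from typing import Dict, List, Any, Optional, Tuple
--
-- def _analyze_scenario_business_value(events: List[Dict], scenario: Dict[str, Any]) -> bool:
--     """Analyze events to determine if business value was delivered for the scenario."""
--
--     # Look for completion events
--     completion_events = [event for event in events if event.get("type") == "agent_completed"]
--     if not completion_events:
--         return False
--
--     # Analyze content for value indicators
--     final_response = completion_events[-1]
--     content = str(final_response.get("content", "")).lower()
--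
--     # Segment-specific value validation
--     segment = scenario.get("segment", "").lower()
--     expected_value = scenario.get("expected_value", "").lower()
--
--     if segment == "free":
--         # Free tier: Basic cost visibility
--         return any(keyword in content for keyword in ["cost", "spend", "usage", "billing"])
--
--     elif segment == "early":
--         # Early tier: Optimization recommendations
--         return any(keyword in content for keyword in ["optimize", "recommend", "save", "improve", "reduce"])
--
--     elif segment == "enterprise":
--         # Enterprise: Comprehensive insights
--         value_indicators = ["cost", "optimize", "performance", "security", "recommend", "analysis"]
--         return sum(1 for indicator in value_indicators if indicator in content) >= 3
--
--     # Default: Basic value check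
--     return any(keyword in content for keyword in ["cost", "optimize", "recommend"])
-- ===== SOURCE B (Python) =====
-- _ALL_KEYWORDS = ("cost", "spend", "usage", "billing", "optimize", "recommend",
--                  "save", "improve", "reduce", "performance", "security", "analysis")
--
-- _SEGMENTS = {
--     "free": (frozenset(("cost", "spend", "usage", "billing")), 1),
--     "early": (frozenset(("optimize", "recommend", "save", "improve", "reduce")), 1),
--     "enterprise": (frozenset(("cost", "optimize", "performance", "security",
--                               "recommend", "analysis")), 3),
-- }
-- _DEFAULT = (frozenset(("cost", "optimize", "recommend")), 1)
--
--
-- def _analyze_scenario_business_value(events, scenario):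
--     # Single forward pass with an overwrite accumulator: ends holding the
--     # content of the last completion event (no filtered list, no reversal).
--     content = None
--     for event in events:
--         if event.get("type") == "agent_completed":
--             content = str(event.get("content", ""))
--     if content is None:
--         return False
--     content = content.lower()
--     # Compute once which of ALL known keywords occur in the content, then
--     # answer every segment by set-intersection cardinality against one table.
--     found = {kw for kw in _ALL_KEYWORDS if kw in content}
--     wanted, need = _SEGMENTS.get(str(scenario.get("segment", "")).lower(), _DEFAULT)
--     return len(found & wanted) >= need
-- ===== Notes on version B (the rewrite author's own statement) =====
-- stated objective: alternative
-- what changed: Replaces the filtered-list-plus-[-1] selection and per-branch any()/sum() keyword tests with a single forward overwrite pass for the last completion event, one precomputed set of all keywords found in the content, and a segment table answered uniformly by set-intersection cardinality against a threshold.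
import Mathlib
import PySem

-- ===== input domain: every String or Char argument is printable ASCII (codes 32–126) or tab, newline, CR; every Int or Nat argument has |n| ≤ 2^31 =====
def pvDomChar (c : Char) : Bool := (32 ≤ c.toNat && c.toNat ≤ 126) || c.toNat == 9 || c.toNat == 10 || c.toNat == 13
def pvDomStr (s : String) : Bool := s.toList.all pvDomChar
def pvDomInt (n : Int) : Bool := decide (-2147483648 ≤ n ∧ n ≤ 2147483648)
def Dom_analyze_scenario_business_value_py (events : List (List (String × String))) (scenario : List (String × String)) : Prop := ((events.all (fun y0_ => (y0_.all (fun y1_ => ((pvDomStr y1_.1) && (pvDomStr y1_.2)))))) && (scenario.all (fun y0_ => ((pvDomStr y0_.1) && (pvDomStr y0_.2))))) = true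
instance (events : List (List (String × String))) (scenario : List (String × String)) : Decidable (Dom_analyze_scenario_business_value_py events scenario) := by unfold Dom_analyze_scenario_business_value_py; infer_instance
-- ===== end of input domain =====

-- B replaces A's filtered-list-plus-[-1] selection and per-branch any/sum keyword tests with a
-- single forward overwrite pass, one precomputed found-keyword set, and a segment table answered
-- by set-intersection cardinality; objective: alternative, same cost.


-- ===== PORT A =====
def analyze_scenario_business_value_py (events : List (List (String × String))) (scenario : List (String × String)) : Bool :=
  -- completion_events = [event for event in events if event.get("type") == "agent_completed"]
  let completion_events := events.filter (fun ev => (PySem.Dict.mk ev).get? "type" == some "agent_completed")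
  if completion_events.isEmpty then false
  else
    -- final_response = completion_events[-1]  (list is nonempty here, so pyGet? is some)
    match PySem.List.pyGet? completion_events (-1) with
    | none => false
    | some final_response =>
      let content := PySem.Str.lower ((PySem.Dict.mk final_response).getD "content" "")
      let segment := PySem.Str.lower ((PySem.Dict.mk scenario).getD "segment" "")
      let _expected_value := PySem.Str.lower ((PySem.Dict.mk scenario).getD "expected_value" "")
      if segment == "free" then
        (["cost", "spend", "usage", "billing"]).any (fun kw => PySem.Str.isIn kw content)
      else if segment == "early" then
        (["optimize", "recommend", "save", "improve", "reduce"]).any (fun kw => PySem.Str.isIn kw content)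
      else if segment == "enterprise" then
        decide (3 ≤ (["cost", "optimize", "performance", "security", "recommend", "analysis"]).foldl
          (fun acc ind => if PySem.Str.isIn ind content then acc + 1 else acc) (0 : Nat))
      else
        (["cost", "optimize", "recommend"]).any (fun kw => PySem.Str.isIn kw content)

-- ===== PORT B =====
def analyze_scenario_business_value_py_alt (events : List (List (String × String))) (scenario : List (String × String)) : Bool :=
  -- for event in events: overwrite accumulator with the content of each completion event
  let content0 := events.foldl (fun acc ev =>
    if (PySem.Dict.mk ev).get? "type" == some "agent_completed"
    then some ((PySem.Dict.mk ev).getD "content" "") else acc) (none : Option String)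
  match content0 with
  | none => false
  | some c =>
    let content := PySem.Str.lower c
    -- found = {kw for kw in _ALL_KEYWORDS if kw in content}
    let allKw : List String := ["cost", "spend", "usage", "billing", "optimize", "recommend",
                                "save", "improve", "reduce", "performance", "security", "analysis"]
    let found : PySem.Set String := PySem.Set.ofList (allKw.filter (fun kw => PySem.Str.isIn kw content))
    let table : PySem.Dict String (List String × Nat) := PySem.Dict.ofList
      [ ("free", (["cost", "spend", "usage", "billing"], 1)),
        ("early", (["optimize", "recommend", "save", "improve", "reduce"], 1)),
        ("enterprise", (["cost", "optimize", "performance", "security", "recommend", "analysis"], 3)) ]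
    let entry := table.getD (PySem.Str.lower ((PySem.Dict.mk scenario).getD "segment" ""))
      (["cost", "optimize", "recommend"], 1)
    decide (entry.2 ≤ PySem.Set.len (PySem.Set.inter found entry.1))

-- ===== PRECONDITION & SPEC =====
def Spec_analyze_scenario_business_value_py (events : List (List (String × String))) (scenario : List (String × String)) (out : Bool) : Prop := out = analyze_scenario_business_value_py_alt events scenario
instance (events : List (List (String × String))) (scenario : List (String × String)) (out : Bool) : Decidable (Spec_analyze_scenario_business_value_py events scenario out) := by unfold Spec_analyze_scenario_business_value_py; infer_instance

-- ===== CLAIM =====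
def Claim_equal_analyze_scenario_business_value_py : Prop := ∀ (events : List (List (String × String))) (scenario : List (String × String)), Dom_analyze_scenario_business_value_py events scenario → Spec_analyze_scenario_business_value_py events scenario (analyze_scenario_business_value_py events scenario)

-- ===== LEMMAS AND PROOFS =====

-- B's forward overwrite pass ends holding f of the last p-element of the list
theorem foldl_overwrite {α β : Type} (p : α → Bool) (f : α → β) (l : List α) (acc : Option β) :
    l.foldl (fun acc ev => if p ev then some (f ev) else acc) acc
      = ((l.filter p).getLast?.map f).or acc := by
  induction l generalizing acc with
  | nil => rfl
  | cons a t ih =>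
      rw [List.foldl_cons, ih, List.filter_cons]
      cases h : p a
      · simp
      · cases hf : (t.filter p).getLast? with
        | none => simp [List.getLast?_cons, hf]
        | some x => simp [List.getLast?_cons, hf]

-- the key counting lemma: intersecting the found-set (over a nodup universe) with a nodup
-- sublist kws of that universe has the same cardinality as counting p directly over kws
theorem inter_found_len (p : String → Bool) (allKw kws : List String)
    (hall : allKw.Nodup) (hk : kws.Nodup) (hsub : ∀ x ∈ kws, x ∈ allKw) :
    PySem.Set.len (PySem.Set.inter (PySem.Set.ofList (allKw.filter p)) kws) = kws.countP p := by
  have h1 : PySem.Set.ofList (allKw.filter p) = allKw.filter p :=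
    PySem.Set.ofList_eq_self_of_nodup (xs := allKw.filter p) (hall.filter p)
  have hperm : (allKw.filter (fun x => decide (x ∈ kws))).Perm kws := by
    rw [List.perm_ext_iff_of_nodup (hall.filter _) hk]
    intro a
    simp only [List.mem_filter, decide_eq_true_eq]
    exact ⟨fun h => h.2, fun h => ⟨hsub a h, h⟩⟩
  have h2 : PySem.Set.len (PySem.Set.inter (PySem.Set.ofList (allKw.filter p)) kws)
      = ((allKw.filter p).filter (fun x => decide (x ∈ kws))).length := by
    simp [PySem.Set.inter, PySem.Set.len, h1]
  rw [h2, ← List.countP_eq_length_filter, List.countP_filter, ← hperm.countP_eq p,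
    List.countP_filter]
  norm_cast
  exact List.countP_congr (fun x _ => by simp [Bool.and_comm])

-- the comparison B makes, rephrased as a direct count over the segment's keywords
theorem decide_le_len_inter (p : String → Bool) (kws : List String)
    (hk : kws.Nodup)
    (hsub : ∀ x ∈ kws, x ∈ (["cost", "spend", "usage", "billing", "optimize", "recommend",
      "save", "improve", "reduce", "performance", "security", "analysis"] : List String)) (n : Nat) :
    decide ((n : Int) ≤ PySem.Set.len (PySem.Set.inter
        (PySem.Set.ofList ((["cost", "spend", "usage", "billing", "optimize", "recommend",
          "save", "improve", "reduce", "performance", "security", "analysis"] : List String).filter p)) kws))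
      = decide (n ≤ kws.countP p) := by
  rw [inter_found_len p _ kws (by decide) hk hsub]
  simp

-- any = at least one match
theorem any_eq_one_le_countP (p : String → Bool) (l : List String) :
    l.any p = decide (1 ≤ l.countP p) := by
  rcases h : l.any p with _ | _
  · simp only [List.any_eq_false] at h
    have : l.countP p = 0 := List.countP_eq_zero.mpr h
    simp [this]
  · simp only [List.any_eq_true] at h
    have : 0 < l.countP p := List.countP_pos_iff.mpr h
    simp; omega

-- last element of a nonempty list via pyGet? (-1)
theorem pyGet_neg_one_nonempty {α : Type} (l : List α) (h : l ≠ []) :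
    PySem.List.pyGet? l (-1) = l.getLast? := by
  cases l with
  | nil => simp at h
  | cons a t =>
      simp [PySem.List.pyGet?, PySem.List.pyIdx?, List.getLast?_eq_getElem?]

-- A's sum-of-indicators loop is countP
theorem foldl_count (p : String → Bool) (l : List String) (acc : Nat) :
    l.foldl (fun acc kw => if p kw then acc + 1 else acc) acc = acc + l.countP p := by
  induction l generalizing acc with
  | nil => simp
  | cons a t ih => cases h : p a <;> simp [h, ih] <;> omega

-- ===== VERDICT =====
theorem analyze_scenario_business_value_py_spec : Claim_equal_analyze_scenario_business_value_py := by
  intro events scenario _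
  unfold Spec_analyze_scenario_business_value_py
  unfold analyze_scenario_business_value_py analyze_scenario_business_value_py_alt
  rw [foldl_overwrite, Option.or_none]
  cases hf : (events.filter (fun ev => (PySem.Dict.mk ev).get? "type" == some "agent_completed")).getLast? with
  | none =>
      have hnil : events.filter (fun ev => (PySem.Dict.mk ev).get? "type" == some "agent_completed") = [] :=
        List.getLast?_eq_none_iff.mp hf
      simp [hnil]
  | some fr =>
      have hne : events.filter (fun ev => (PySem.Dict.mk ev).get? "type" == some "agent_completed") ≠ [] := by
        intro h; rw [h] at hf; simp at hf
      have hie : (events.filter (fun ev => (PySem.Dict.mk ev).get? "type" == some "agent_completed")).isEmpty = false := by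
        simp [hne]
      simp only [hie, Bool.false_eq_true, if_false, pyGet_neg_one_nonempty _ hne, hf, Option.map_some]
      set content := PySem.Str.lower ((PySem.Dict.mk fr).getD "content" "") with hc
      set p : String → Bool := fun kw => PySem.Str.isIn kw content with hp
      have e : (PySem.Dict.ofList
          [ ("free", (["cost", "spend", "usage", "billing"], 1)),
            ("early", (["optimize", "recommend", "save", "improve", "reduce"], 1)),
            ("enterprise", (["cost", "optimize", "performance", "security", "recommend", "analysis"], 3)) ] :
            PySem.Dict String (List String × Nat)) = PySem.Dict.mk
          [ ("free", (["cost", "spend", "usage", "billing"], 1)),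
            ("early", (["optimize", "recommend", "save", "improve", "reduce"], 1)),
            ("enterprise", (["cost", "optimize", "performance", "security", "recommend", "analysis"], 3)) ] := by decide
      set seg := PySem.Str.lower ((PySem.Dict.mk scenario).getD "segment" "") with hs
      by_cases h1 : seg = "free"
      · rw [h1]
        simp only [e, PySem.Dict.getD_eq_get?_getD, PySem.Dict.get?_mk_cons,
          String.reduceBEq, beq_self_eq_true, Bool.false_eq_true, if_true, if_false,
          Option.getD_some]
        rw [any_eq_one_le_countP, decide_le_len_inter p _ (by decide) (by decide)]
      · by_cases h2 : seg = "early"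
        · rw [h2]
          simp only [e, PySem.Dict.getD_eq_get?_getD, PySem.Dict.get?_mk_cons,
            String.reduceBEq, beq_self_eq_true, Bool.false_eq_true, if_true, if_false,
            Option.getD_some]
          rw [any_eq_one_le_countP, decide_le_len_inter p _ (by decide) (by decide)]
        · by_cases h3 : seg = "enterprise"
          · rw [h3, foldl_count]
            simp only [e, PySem.Dict.getD_eq_get?_getD, PySem.Dict.get?_mk_cons,
              String.reduceBEq, beq_self_eq_true, Bool.false_eq_true, if_true, if_false,
              Option.getD_some]
            rw [decide_le_len_inter p _ (by decide) (by decide)]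
            simp [hp]
          · have b1 : (seg == "free") = false := by simp [h1]
            have b2 : (seg == "early") = false := by simp [h2]
            have b3 : (seg == "enterprise") = false := by simp [h3]
            have b1' : ("free" == seg) = false := by simp [Ne.symm h1]
            have b2' : ("early" == seg) = false := by simp [Ne.symm h2]
            have b3' : ("enterprise" == seg) = false := by simp [Ne.symm h3]
            have hnone : (PySem.Dict.mk ([] : List (String × (List String × Nat)))).get? seg = none := by
              simp [PySem.Dict.get?]
            simp only [e, PySem.Dict.getD_eq_get?_getD, PySem.Dict.get?_mk_cons,
              b1, b2, b3, b1', b2', b3', Bool.false_eq_true, if_false, hnone, Option.getD_none]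
            rw [any_eq_one_le_countP, decide_le_len_inter p _ (by decide) (by decide)]
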